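-- pv_equiv track=rewrite | github.com/bobberdolle1/EFT-Helper | services/sync_service.py | _calculate_effective_range
-- ===== SOURCE A (Python) =====
-- from typing import Dict, List, Optional
--
-- def _calculate_effective_range(caliber: Optional[str]) -> Optional[int]:
--     """Calculate effective range based on caliber."""
--     if not caliber:
--         return None
--
--     caliber_lower = caliber.lower()
--
--     if any(x in caliber_lower for x in ["7.62x54", "7.62x51", ".308", "12.7x108"]):
--         return 800  # Sniper calibers
--     elif any(x in caliber_lower for x in ["5.56x45", "5.45x39", "7.62x39"]):
--         return 400  # Rifle calibers
--     elif any(x in caliber_lower for x in ["9x19", "9x18", ".45", "9x21"]):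
--         return 100  # Pistol calibers
--     elif "12ga" in caliber_lower or "20ga" in caliber_lower:
--         return 50   # Shotgun
--
--     return None
-- ===== SOURCE B (Python) =====
-- from typing import Optional
--
-- # Flat (pattern, range) list in ASCENDING range order: B does not use tier
-- # priority at all -- it keeps the MAXIMUM range among all matching patterns,
-- # which coincides with A's priority order because priority = descending range.
-- _PATTERN_RANGES = [
--     ("12ga", 50), ("20ga", 50),
--     ("9x19", 100), ("9x18", 100), (".45", 100), ("9x21", 100),
--     ("5.56x45", 400), ("5.45x39", 400), ("7.62x39", 400),
--     ("7.62x54", 800), ("7.62x51", 800), (".308", 800), ("12.7x108", 800),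
-- ]
--
-- def _calculate_effective_range(caliber: Optional[str]) -> Optional[int]:
--     if not caliber:
--         return None
--     caliber_lower = caliber.lower()
--     best = None
--     for pat, rng in _PATTERN_RANGES:
--         if pat in caliber_lower and (best is None or rng > best):
--             best = rng
--     return best
-- ===== Notes on version B (the rewrite author's own statement) =====
-- stated objective: alternative
-- what changed: Replaces the priority-ordered elif chain of tier tests with a single flat pass over (pattern, range) pairs in ascending range order that keeps the maximum matched range; equivalence rests on tier priority coinciding with descending range.
import Mathlib
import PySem

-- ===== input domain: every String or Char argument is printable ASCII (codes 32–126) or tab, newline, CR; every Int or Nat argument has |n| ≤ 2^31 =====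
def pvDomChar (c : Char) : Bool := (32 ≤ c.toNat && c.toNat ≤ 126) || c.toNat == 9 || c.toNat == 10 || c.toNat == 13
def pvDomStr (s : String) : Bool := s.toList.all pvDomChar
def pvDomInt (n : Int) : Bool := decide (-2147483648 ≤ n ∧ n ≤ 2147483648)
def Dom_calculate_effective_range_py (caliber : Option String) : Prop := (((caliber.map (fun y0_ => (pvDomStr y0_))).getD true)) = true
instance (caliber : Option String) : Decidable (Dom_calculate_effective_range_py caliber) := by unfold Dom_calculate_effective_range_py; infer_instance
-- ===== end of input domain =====

-- ===== PORT A =====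
-- B replaces A's priority elif chain with a flat max-of-matched-ranges scan over
-- an ascending (pattern, range) table; same return value everywhere (alternative).
def calculate_effective_range_py (caliber : Option String) : Option Int :=
  match caliber with
  | none => none
  | some s =>
    if s = "" then none
    else
      let caliber_lower := PySem.Str.lower s
      if ["7.62x54", "7.62x51", ".308", "12.7x108"].any (fun x => PySem.Str.isIn x caliber_lower) then
        some 800
      else if ["5.56x45", "5.45x39", "7.62x39"].any (fun x => PySem.Str.isIn x caliber_lower) then
        some 400
      else if ["9x19", "9x18", ".45", "9x21"].any (fun x => PySem.Str.isIn x caliber_lower) then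
        some 100
      else if PySem.Str.isIn "12ga" caliber_lower || PySem.Str.isIn "20ga" caliber_lower then
        some 50
      else none

-- ===== PORT B =====
-- flat (pattern, range) list in ascending range order (Source B's _PATTERN_RANGES)
def patRanges : List (String × Int) :=
  [("12ga", 50), ("20ga", 50),
   ("9x19", 100), ("9x18", 100), (".45", 100), ("9x21", 100),
   ("5.56x45", 400), ("5.45x39", 400), ("7.62x39", 400),
   ("7.62x54", 800), ("7.62x51", 800), (".308", 800), ("12.7x108", 800)]

-- one loop step: if pat matches and rng beats best, take rng
def bestStep (caliber_lower : String) (best : Option Int) (pr : String × Int) : Option Int :=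
  if PySem.Str.isIn pr.1 caliber_lower && (best.elim true (fun b => decide (b < pr.2)))
  then some pr.2 else best

def calculate_effective_range_py_alt (caliber : Option String) : Option Int :=
  match caliber with
  | none => none
  | some s =>
    if s = "" then none
    else
      let caliber_lower := PySem.Str.lower s
      patRanges.foldl (bestStep caliber_lower) none

-- ===== PRECONDITION & SPEC =====
def Spec_calculate_effective_range_py (caliber : Option String) (out : Option Int) : Prop := out = calculate_effective_range_py_alt caliber
instance (caliber : Option String) (out : Option Int) : Decidable (Spec_calculate_effective_range_py caliber out) := by unfold Spec_calculate_effective_range_py; infer_instance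

-- ===== CLAIM (what is proved, stated in full; the proofs are below) =====
def Claim_equal_calculate_effective_range_py : Prop := ∀ (caliber : Option String), Dom_calculate_effective_range_py caliber → Spec_calculate_effective_range_py caliber (calculate_effective_range_py caliber)

-- ===== LEMMAS AND PROOFS =====

-- once best holds r, patterns of the same range r never overwrite it
theorem foldl_bestStep_stay (cl : String) (r : Int) (ps : List String) :
    (ps.map (fun p => (p, r))).foldl (bestStep cl) (some r) = some r := by
  induction ps with
  | nil => rfl
  | cons p ps ih =>
    simp only [List.map_cons, List.foldl_cons]
    have hstep : bestStep cl (some r) (p, r) = some r := by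
      unfold bestStep
      rw [if_neg (by simp)]
    rw [hstep]
    exact ih

-- folding one same-range group from a strictly smaller best yields
-- `some r` iff some pattern of the group matches, else it keeps the best
theorem foldl_bestStep_group (cl : String) (r : Int) (ps : List String) (b : Option Int)
    (hb : b.elim True (fun x => x < r)) :
    (ps.map (fun p => (p, r))).foldl (bestStep cl) b =
      if ps.any (fun p => PySem.Str.isIn p cl) then some r else b := by
  induction ps generalizing b with
  | nil => simp
  | cons p ps ih =>
    simp only [List.map_cons, List.foldl_cons]
    cases hB : PySem.Str.isIn p cl with
    | true =>
      have hcond : bestStep cl b (p, r) = some r := by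
        unfold bestStep
        rw [hB, Bool.true_and]
        cases b with
        | none => rfl
        | some x =>
          rw [if_pos]
          simpa using hb
      have hany : ((p :: ps).any (fun p => PySem.Str.isIn p cl)) = true := by
        rw [List.any_cons, hB]; exact Bool.true_or _
      rw [hcond, foldl_bestStep_stay, if_pos hany]
    | false =>
      have hcond : bestStep cl b (p, r) = b := by
        unfold bestStep
        rw [hB, Bool.false_and, if_neg (by simp)]
      rw [hcond, ih b hb, List.any_cons, hB, Bool.false_or]

-- ===== VERDICT (by name: the statement is the Claim_ definition above) =====
theorem calculate_effective_range_py_spec : Claim_equal_calculate_effective_range_py := by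
  intro caliber _
  unfold Spec_calculate_effective_range_py
  cases caliber with
  | none => rfl
  | some s =>
    simp only [calculate_effective_range_py, calculate_effective_range_py_alt]
    by_cases hs : s = ""
    · simp [hs]
    · rw [if_neg hs, if_neg hs]
      set cl := PySem.Str.lower s with hcl
      have hsplit : patRanges =
          (["12ga", "20ga"].map (fun p => (p, (50 : Int)))) ++
          (["9x19", "9x18", ".45", "9x21"].map (fun p => (p, (100 : Int)))) ++
          (["5.56x45", "5.45x39", "7.62x39"].map (fun p => (p, (400 : Int)))) ++
          (["7.62x54", "7.62x51", ".308", "12.7x108"].map (fun p => (p, (800 : Int)))) := rfl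
      rw [hsplit]
      simp only [List.foldl_append]
      rw [foldl_bestStep_group cl 50 _ none (by trivial)]
      rw [foldl_bestStep_group cl 100 _ _ (by
        repeat' split
        all_goals norm_num [Option.elim])]
      rw [foldl_bestStep_group cl 400 _ _ (by
        repeat' split
        all_goals norm_num [Option.elim])]
      rw [foldl_bestStep_group cl 800 _ _ (by
        repeat' split
        all_goals norm_num [Option.elim])]
      rw [show (["12ga", "20ga"].any (fun p => PySem.Str.isIn p cl)) =
            (PySem.Str.isIn "12ga" cl || PySem.Str.isIn "20ga" cl) by
          rw [List.any_cons, List.any_cons, List.any_nil, Bool.or_false]]
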